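-- pv_equiv track=rewrite | github.com/chelaxian/tg-ytdlp-bot | HELPERS/proxy_helper.py | is_domain_in_list
-- ===== SOURCE A (Python) =====
-- def is_domain_in_list(domain, domain_list):
--     """Check if domain or any of its subdomains match entries in domain_list"""
--     if not domain_list:
--         return False
--
--     # Direct match
--     if domain in domain_list:
--         return True
--
--     # Check if any domain in the list is a subdomain of the current domain
--     for listed_domain in domain_list:
--         if domain.endswith('.' + listed_domain):
--             return True
--
--     return False
-- ===== SOURCE B (Python) =====
-- def is_domain_in_list(domain, domain_list):
--     """Check if domain or any of its subdomains match entries in domain_list"""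
--     entries = set(domain_list)
--     if domain in entries:
--         return True
--     for i, ch in enumerate(domain):
--         if ch == '.' and domain[i + 1:] in entries:
--             return True
--     return False
-- ===== Notes on version B (the rewrite author's own statement) =====
-- stated objective: alternative
-- what changed: Instead of scanning every list entry and running endswith('.'+entry) on the domain, B builds a set of the entries once and makes a single pass over the domain's characters, probing the set with the full domain and with the tail after each '.'.
import Mathlib
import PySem

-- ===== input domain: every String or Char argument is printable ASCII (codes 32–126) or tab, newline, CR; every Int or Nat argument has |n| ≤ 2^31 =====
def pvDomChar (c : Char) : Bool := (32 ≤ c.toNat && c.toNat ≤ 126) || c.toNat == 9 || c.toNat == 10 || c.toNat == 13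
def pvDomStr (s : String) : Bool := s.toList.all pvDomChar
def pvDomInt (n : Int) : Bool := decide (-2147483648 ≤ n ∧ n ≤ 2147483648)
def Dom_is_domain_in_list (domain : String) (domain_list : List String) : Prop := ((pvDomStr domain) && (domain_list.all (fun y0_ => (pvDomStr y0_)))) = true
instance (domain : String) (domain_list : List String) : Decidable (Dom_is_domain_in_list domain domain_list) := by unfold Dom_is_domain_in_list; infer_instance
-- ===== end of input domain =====

-- B replaces A's scan of every list entry with an endswith test by one pass over the
-- domain's own dotted suffixes probed against a set built once from the list (objective: alternative).


-- ===== PORT A =====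
-- '.' + listed_domain is ported as the exact char-list concatenation '.' :: d.toList.
def is_domain_in_list (domain : String) (domain_list : List String) : Bool :=
  if domain_list = [] then false
  else if domain_list.contains domain then true
  else domain_list.any (fun d => PySem.Chars.endswith domain.toList ('.' :: d.toList))

-- ===== PORT B =====
-- the 'for i, ch in enumerate(domain): if ch == '.' and domain[i+1:] in entries' loop:
-- structural recursion over the char list; at each '.' the tail IS domain[i+1:].
def altSuffixScan (entries : PySem.Set String) (cs : List Char) : Bool :=
  match cs with
  | [] => false
  | c :: rest =>
      if c == '.' && PySem.Set.contains entries (String.ofList rest) then true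
      else altSuffixScan entries rest

def is_domain_in_list_alt (domain : String) (domain_list : List String) : Bool :=
  let entries : PySem.Set String := PySem.Set.ofList domain_list
  if PySem.Set.contains entries domain then true
  else altSuffixScan entries domain.toList

-- ===== PRECONDITION & SPEC =====
def Spec_is_domain_in_list (domain : String) (domain_list : List String) (out : Bool) : Prop := out = is_domain_in_list_alt domain domain_list
instance (domain : String) (domain_list : List String) (out : Bool) : Decidable (Spec_is_domain_in_list domain domain_list out) := by unfold Spec_is_domain_in_list; infer_instance

-- ===== CLAIM (what is proved, stated in full; the proofs are below) =====
def Claim_equal_is_domain_in_list : Prop := ∀ (domain : String) (domain_list : List String), Dom_is_domain_in_list domain domain_list → Spec_is_domain_in_list domain domain_list (is_domain_in_list domain domain_list)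

-- ===== LEMMAS AND PROOFS =====

-- B's suffix scan finds exactly the tails after a '.' that lie in the entry set.
theorem altSuffixScan_iff (entries : PySem.Set String) (cs : List Char) :
    altSuffixScan entries cs = true ↔ ∃ rest, ('.' :: rest) <:+ cs ∧ String.ofList rest ∈ entries := by
  induction cs with
  | nil => simp [altSuffixScan]
  | cons c rest ih =>
    simp only [altSuffixScan]
    by_cases h : (c == '.' && PySem.Set.contains entries (String.ofList rest)) = true
    · simp only [h, if_true, true_iff]
      rw [Bool.and_eq_true, beq_iff_eq, PySem.Set.contains_iff _ _] at h
      exact ⟨rest, h.1 ▸ List.suffix_refl _, h.2⟩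
    · rw [if_neg h, ih]
      constructor
      · rintro ⟨r, hs, hm⟩; exact ⟨r, hs.trans (List.suffix_cons _ _), hm⟩
      · rintro ⟨r, hs, hm⟩
        rcases List.suffix_cons_iff.mp hs with heq | hs'
        · exfalso
          cases heq
          exact h (by rw [Bool.and_eq_true, beq_iff_eq, PySem.Set.contains_iff _ _]; exact ⟨rfl, hm⟩)
        · exact ⟨r, hs', hm⟩

-- A's endswith test over the list says: some listed entry is a dotted tail of the domain.
theorem portA_iff (domain : String) (domain_list : List String) :
    is_domain_in_list domain domain_list = true ↔
      domain ∈ domain_list ∨ ∃ rest, ('.' :: rest) <:+ domain.toList ∧ String.ofList rest ∈ domain_list := by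
  unfold is_domain_in_list
  by_cases hnil : domain_list = []
  · subst hnil; simp
  · rw [if_neg hnil]
    by_cases hmem : domain_list.contains domain
    · simp only [hmem, if_true, true_iff]
      exact Or.inl (by simpa using hmem)
    · rw [if_neg hmem, List.any_eq_true]
      constructor
      · rintro ⟨d, hd, he⟩
        rw [PySem.Chars.endswith_iff] at he
        exact Or.inr ⟨d.toList, he, by simpa using hd⟩
      · rintro (h | ⟨rest, hs, hm⟩)
        · exact absurd (by simpa using h) (by simpa using hmem)
        · exact ⟨String.ofList rest, hm, by rw [PySem.Chars.endswith_iff]; simpa using hs⟩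

theorem portB_iff (domain : String) (domain_list : List String) :
    is_domain_in_list_alt domain domain_list = true ↔
      domain ∈ domain_list ∨ ∃ rest, ('.' :: rest) <:+ domain.toList ∧ String.ofList rest ∈ domain_list := by
  unfold is_domain_in_list_alt
  by_cases hc : PySem.Set.contains (PySem.Set.ofList domain_list) domain = true
  · simp only [hc, if_true, true_iff]
    exact Or.inl ((PySem.Set.mem_ofList _ _).mp ((PySem.Set.contains_iff _ _).mp hc))
  · rw [if_neg hc, altSuffixScan_iff]
    constructor
    · rintro ⟨r, hs, hm⟩; exact Or.inr ⟨r, hs, (PySem.Set.mem_ofList _ _).mp hm⟩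
    · rintro (h | ⟨r, hs, hm⟩)
      · exact absurd ((PySem.Set.contains_iff _ _).mpr ((PySem.Set.mem_ofList _ _).mpr h)) hc
      · exact ⟨r, hs, (PySem.Set.mem_ofList _ _).mpr hm⟩

-- ===== VERDICT (by name: the statement is the Claim_ definition above) =====
theorem is_domain_in_list_spec : Claim_equal_is_domain_in_list := by
  intro domain domain_list _
  unfold Spec_is_domain_in_list
  rw [Bool.eq_iff_iff, portA_iff, portB_iff]
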